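-- pv_equiv track=rewrite | github.com/freelife1191/closing-bet-demo | services/kr_market_realtime_price_service.py | _is_normalized_unique_ticker_list
-- ===== SOURCE A (Python) =====
-- from typing import Any, Callable
--
-- def _is_normalized_unique_ticker_list(tickers: list[Any]) -> bool:
--     seen: set[str] = set()
--     for ticker in tickers:
--         if not isinstance(ticker, str):
--             return False
--         if len(ticker) != 6 or not ticker.isdigit():
--             return False
--         if ticker in seen:
--             return False
--         seen.add(ticker)
--     return True
-- ===== SOURCE B (Python) =====
-- def _is_normalized_unique_ticker_list(tickers: list) -> bool:
--     if not all(isinstance(t, str) and len(t) == 6 and t.isdigit() for t in tickers):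
--         return False
--     return len(set(tickers)) == len(tickers)
-- ===== Notes on version B (the rewrite author's own statement) =====
-- stated objective: simpler
-- what changed: Replaces the single interleaved loop with an incremental 'seen' set and three early returns by two separate whole-list passes: one all(...) generator for the format checks, then len(set(tickers)) == len(tickers) for uniqueness.
import Mathlib
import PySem

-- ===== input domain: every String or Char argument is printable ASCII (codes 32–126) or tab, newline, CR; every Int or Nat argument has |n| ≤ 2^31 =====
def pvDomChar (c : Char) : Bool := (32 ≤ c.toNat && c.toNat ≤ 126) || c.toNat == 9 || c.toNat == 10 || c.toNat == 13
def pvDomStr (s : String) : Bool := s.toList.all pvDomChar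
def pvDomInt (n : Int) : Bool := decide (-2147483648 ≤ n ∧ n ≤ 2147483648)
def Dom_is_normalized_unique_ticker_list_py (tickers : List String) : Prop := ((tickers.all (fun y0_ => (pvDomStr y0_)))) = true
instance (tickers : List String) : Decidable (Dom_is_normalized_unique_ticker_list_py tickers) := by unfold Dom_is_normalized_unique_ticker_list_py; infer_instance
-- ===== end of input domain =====

-- B replaces A's single loop with an incremental seen-set by two separate passes: an all(...) format check, then len(set(tickers)) == len(tickers) for uniqueness (same cost, simpler).


-- ===== PORT A =====
-- one interleaved loop: format check, then membership in the incremental 'seen' set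
def isTickerLoopA : List String → PySem.Set String → Bool
  | [], _ => true
  | t :: rest, seen =>
    if PySem.Str.len t ≠ 6 ∨ PySem.Str.strIsdigit t = false then false
    else if PySem.Set.contains seen t then false
    else isTickerLoopA rest (PySem.Set.add seen t)

def is_normalized_unique_ticker_list_py (tickers : List String) : Bool :=
  isTickerLoopA tickers PySem.Set.empty

-- ===== PORT B =====
-- B: two separate passes — all(format checks) first, then len(set(tickers)) == len(tickers)
def is_normalized_unique_ticker_list_py_alt (tickers : List String) : Bool :=
  if !(tickers.all fun t => decide (PySem.Str.len t = 6) && PySem.Str.strIsdigit t) then false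
  else PySem.Set.len (PySem.Set.ofList tickers) == PySem.List.len tickers

-- ===== PRECONDITION & SPEC =====
def Spec_is_normalized_unique_ticker_list_py (tickers : List String) (out : Bool) : Prop := out = is_normalized_unique_ticker_list_py_alt tickers
instance (tickers : List String) (out : Bool) : Decidable (Spec_is_normalized_unique_ticker_list_py tickers out) := by unfold Spec_is_normalized_unique_ticker_list_py; infer_instance

-- ===== CLAIM (what is proved, stated in full; the proofs are below) =====
def Claim_equal_is_normalized_unique_ticker_list_py : Prop := ∀ (tickers : List String), Dom_is_normalized_unique_ticker_list_py tickers → Spec_is_normalized_unique_ticker_list_py tickers (is_normalized_unique_ticker_list_py tickers)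

-- ===== LEMMAS AND PROOFS =====

def validT (t : String) : Bool := decide (PySem.Str.len t = 6) && PySem.Str.strIsdigit t

lemma validT_iff (t : String) : validT t = true ↔ (PySem.Str.len t = 6 ∧ PySem.Str.strIsdigit t = true) := by
  simp [validT]

lemma loopA_iff (ts : List String) : ∀ (seen : PySem.Set String),
    isTickerLoopA ts seen = true ↔
      ((∀ t ∈ ts, validT t = true) ∧ ts.Nodup ∧ ∀ t ∈ ts, t ∉ seen) := by
  induction ts with
  | nil => intro seen; simp [isTickerLoopA]
  | cons t rest ih =>
    intro seen
    simp only [isTickerLoopA]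
    by_cases hv : PySem.Str.len t ≠ 6 ∨ PySem.Str.strIsdigit t = false
    · simp only [if_pos hv]
      constructor
      · intro h; cases h
      · rintro ⟨hall, -, -⟩
        have hvt := (validT_iff t).mp (hall t (by simp))
        rcases hv with hv | hv
        · exact absurd hvt.1 hv
        · rw [hvt.2] at hv; cases hv
    · simp only [if_neg hv]
      push Not at hv
      have hvT : validT t = true := by
        refine (validT_iff t).mpr ⟨hv.1, ?_⟩
        cases h : PySem.Str.strIsdigit t
        · exact absurd h hv.2
        · rfl
      by_cases hm : PySem.Set.contains seen t = true
      · have hmem : t ∈ seen := (PySem.Set.contains_iff _ _).mp hm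
        simp only [if_pos hm]
        constructor
        · intro h; cases h
        · rintro ⟨-, -, hnot⟩
          exact absurd hmem (hnot t (by simp))
      · simp only [if_neg hm]
        have hnm : t ∉ seen := fun h => hm ((PySem.Set.contains_iff _ _).mpr h)
        rw [ih (PySem.Set.add seen t)]
        constructor
        · rintro ⟨hall, hnd, hnot⟩
          refine ⟨?_, ?_, ?_⟩
          · intro u hu
            rcases List.mem_cons.mp hu with h | h
            · subst h; exact hvT
            · exact hall u h
          · refine List.nodup_cons.mpr ⟨?_, hnd⟩
            intro htm
            exact (hnot t htm) ((PySem.Set.mem_add _ _ _).mpr (Or.inr rfl))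
          · intro u hu
            rcases List.mem_cons.mp hu with h | h
            · subst h; exact hnm
            · intro hus
              exact (hnot u h) ((PySem.Set.mem_add _ _ _).mpr (Or.inl hus))
        · rintro ⟨hall, hnd, hnot⟩
          refine ⟨fun u hu => hall u (List.mem_cons_of_mem _ hu), (List.nodup_cons.mp hnd).2, ?_⟩
          intro u hu hus
          rcases (PySem.Set.mem_add _ _ _).mp hus with h | h
          · exact (hnot u (List.mem_cons_of_mem _ hu)) h
          · subst h
            exact (List.nodup_cons.mp hnd).1 hu

lemma ofList_sublist (xs : List String) : List.Sublist (PySem.Set.ofList xs) xs := by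
  induction xs with
  | nil => simp [PySem.Set.ofList_nil]
  | cons x xs ih =>
    rw [PySem.Set.ofList_cons]
    refine List.Sublist.cons₂ x (List.Sublist.trans ?_ ih)
    show List.Sublist ((PySem.Set.ofList xs).filter (fun y => !(y == x))) (PySem.Set.ofList xs)
    exact List.filter_sublist

lemma len_ofList_iff (xs : List String) :
    (PySem.Set.ofList xs).length = xs.length ↔ xs.Nodup := by
  constructor
  · intro h
    have heq := (ofList_sublist xs).eq_of_length h
    rw [← heq]; exact PySem.Set.nodup_ofList xs
  · intro h
    rw [PySem.Set.ofList_eq_self_of_nodup xs h]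

lemma loopA_eq_false (ts : List String)
    (h : ¬ ((∀ t ∈ ts, validT t = true) ∧ ts.Nodup ∧ ∀ t ∈ ts, t ∉ PySem.Set.empty)) :
    isTickerLoopA ts PySem.Set.empty = false := by
  rw [Bool.eq_false_iff]
  intro hc
  exact h ((loopA_iff ts _).mp hc)

-- ===== VERDICT (by name: the statement is the Claim_ definition above) =====
theorem is_normalized_unique_ticker_list_py_spec : Claim_equal_is_normalized_unique_ticker_list_py := by
  intro ts _
  unfold Spec_is_normalized_unique_ticker_list_py
  unfold is_normalized_unique_ticker_list_py is_normalized_unique_ticker_list_py_alt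
  by_cases hall : (ts.all fun t => decide (PySem.Str.len t = 6) && PySem.Str.strIsdigit t) = true
  · rw [hall]
    simp only [Bool.not_true, Bool.false_eq_true, if_false]
    have hallv : ∀ t ∈ ts, validT t = true := fun t ht => (List.all_eq_true.mp hall) t ht
    by_cases hnd : ts.Nodup
    · have hA : isTickerLoopA ts PySem.Set.empty = true := by
        rw [loopA_iff]
        exact ⟨hallv, hnd, by simp [PySem.Set.empty]⟩
      rw [hA]
      have hlen : (PySem.Set.ofList ts).length = ts.length := (len_ofList_iff ts).mpr hnd
      simp [PySem.Set.len, PySem.List.len, hlen]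
    · rw [loopA_eq_false ts (by rintro ⟨-, h, -⟩; exact hnd h)]
      have hlen : (PySem.Set.ofList ts).length ≠ ts.length := fun h => hnd ((len_ofList_iff ts).mp h)
      simp [PySem.Set.len, PySem.List.len]
      omega
  · rw [Bool.eq_false_iff.mpr hall]
    simp only [Bool.not_false, if_true]
    refine loopA_eq_false ts ?_
    rintro ⟨h1, -, -⟩
    exact hall (List.all_eq_true.mpr (fun t ht => h1 t ht))
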